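-- pv_equiv track=rewrite | github.com/microsoft/WikiCommentEdit | wiki_util.py | mapDiffContext
-- ===== SOURCE A (Python) =====
-- def mapDiffContext(sents, start_sent, end_sent):
--
--     start_idx = -1
--     end_idx = -1
--     start_sent_str = " ".join(start_sent)
--     end_sent_str = " ".join(end_sent)
--     for i, sent in enumerate(sents):
--         sent_str = " ".join(sent)
--         if start_idx < 0 and start_sent_str in sent_str:
--             start_idx = i
--
--         if end_sent_str in sent_str:
--             end_idx = i
--             break
--
--     # if start_idx == -1:
--     #     start_idx = 0
--
--     # if end_idx == -1:
--     #     context_sents = sents[start_idx:]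
--     # else:
--     #     context_sents = sents[start_idx:end_idx + 1]
--     if start_idx == -1 or end_idx == -1:
--         return None, None
--
--     diff_offset = sum([len(sents[i]) for i in range(start_idx)])
--     return sents[start_idx:end_idx + 1], diff_offset
-- ===== SOURCE B (Python) =====
-- def mapDiffContext(sents, start_sent, end_sent):
--     start_str = " ".join(start_sent)
--     end_str = " ".join(end_sent)
--     joined = [" ".join(s) for s in sents]
--     end_idx = next((i for i, t in enumerate(joined) if end_str in t), None)
--     if end_idx is None:
--         return None, None
--     start_idx = next((i for i, t in enumerate(joined[:end_idx + 1]) if start_str in t), None)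
--     if start_idx is None:
--         return None, None
--     return sents[start_idx:end_idx + 1], sum(len(s) for s in sents[:start_idx])
-- ===== Notes on version B (the rewrite author's own statement) =====
-- stated objective: simpler
-- what changed: Replaces the single stateful loop carrying start_idx/end_idx sentinels with two bounded first-match searches (end first, then start restricted to the prefix up to the end match) and a prefix-sum over sents[:start_idx] instead of an index-range sum.
import Mathlib
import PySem

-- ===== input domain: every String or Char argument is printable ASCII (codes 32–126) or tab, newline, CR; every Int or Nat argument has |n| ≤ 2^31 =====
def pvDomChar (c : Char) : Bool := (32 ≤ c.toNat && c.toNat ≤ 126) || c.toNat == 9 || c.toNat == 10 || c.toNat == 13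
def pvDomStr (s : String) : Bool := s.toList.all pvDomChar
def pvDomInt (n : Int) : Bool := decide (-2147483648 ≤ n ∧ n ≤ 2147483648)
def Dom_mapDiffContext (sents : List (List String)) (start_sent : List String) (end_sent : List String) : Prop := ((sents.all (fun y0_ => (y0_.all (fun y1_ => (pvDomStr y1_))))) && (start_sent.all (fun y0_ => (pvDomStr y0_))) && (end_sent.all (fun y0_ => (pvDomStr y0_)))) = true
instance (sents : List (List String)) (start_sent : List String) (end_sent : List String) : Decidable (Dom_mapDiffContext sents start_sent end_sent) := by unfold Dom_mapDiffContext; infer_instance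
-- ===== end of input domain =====

-- B replaces A's single stateful sentinel-carrying loop by two bounded first-match searches
-- (end first, then start within the prefix) and a prefix-sum; objective: simpler, same cost.

-- ===== PORT A =====
-- A's for-loop with break, carrying (start_idx, end_idx); returns (start_idx, end_idx)
def pvLoopA (startStr endStr : String) : List (List String) → Int → Int → Int × Int
  | [], _, start_idx => (start_idx, -1)
  | sent :: rest, i, start_idx =>
    let sent_str := PySem.Str.join " " sent
    let start_idx' := if start_idx < 0 ∧ PySem.Str.isIn startStr sent_str = true then i else start_idx
    if PySem.Str.isIn endStr sent_str = true then (start_idx', i)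
    else pvLoopA startStr endStr rest (i + 1) start_idx'

def mapDiffContext (sents : List (List String)) (start_sent : List String) (end_sent : List String) : Option (List (List String)) × Option Int :=
  let start_sent_str := PySem.Str.join " " start_sent
  let end_sent_str := PySem.Str.join " " end_sent
  let r := pvLoopA start_sent_str end_sent_str sents 0 (-1)
  if r.1 = -1 ∨ r.2 = -1 then (none, none)
  else
    let diff_offset := (((PySem.List.pyRange 0 r.1 1).map (fun i => ((PySem.List.pyGetD sents i []).length : Int))).sum)
    (some (PySem.List.slice sents (some r.1) (some (r.2 + 1))), some diff_offset)

-- ===== PORT B =====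
def mapDiffContext_alt (sents : List (List String)) (start_sent : List String) (end_sent : List String) : Option (List (List String)) × Option Int :=
  let start_str := PySem.Str.join " " start_sent
  let end_str := PySem.Str.join " " end_sent
  let joined := sents.map (PySem.Str.join " ")
  match joined.findIdx? (fun t => PySem.Str.isIn end_str t) with
  | none => (none, none)
  | some e =>
    match (joined.take (e + 1)).findIdx? (fun t => PySem.Str.isIn start_str t) with
    | none => (none, none)
    | some s =>
      (some ((sents.take (e + 1)).drop s),
       some (((sents.take s).map (fun x => (x.length : Int))).sum))

-- ===== PRECONDITION & SPEC =====
def Spec_mapDiffContext (sents : List (List String)) (start_sent : List String) (end_sent : List String) (out : Option (List (List String)) × Option Int) : Prop := out = mapDiffContext_alt sents start_sent end_sent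
instance (sents : List (List String)) (start_sent : List String) (end_sent : List String) (out : Option (List (List String)) × Option Int) : Decidable (Spec_mapDiffContext sents start_sent end_sent out) := by unfold Spec_mapDiffContext; infer_instance

-- ===== CLAIM (what is proved, stated in full; the proofs are below) =====
def Claim_equal_mapDiffContext : Prop := ∀ (sents : List (List String)) (start_sent : List String) (end_sent : List String), Dom_mapDiffContext sents start_sent end_sent → Spec_mapDiffContext sents start_sent end_sent (mapDiffContext sents start_sent end_sent)

-- ===== LEMMAS AND PROOFS =====

-- A's loop with the two membership tests abstracted as predicates (used only in proofs)
def pvGenLoop (pS pE : List String → Bool) : List (List String) → Int → Int → Int × Int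
  | [], _, start_idx => (start_idx, -1)
  | sent :: rest, i, start_idx =>
    let start_idx' := if start_idx < 0 ∧ pS sent = true then i else start_idx
    if pE sent = true then (start_idx', i)
    else pvGenLoop pS pE rest (i + 1) start_idx'

theorem pvLoopA_eq_gen (ss es : String) (l : List (List String)) (i si : Int) :
    pvLoopA ss es l i si =
      pvGenLoop (fun t => PySem.Str.isIn ss (PySem.Str.join " " t))
        (fun t => PySem.Str.isIn es (PySem.Str.join " " t)) l i si := by
  induction l generalizing i si with
  | nil => rfl
  | cons h t ih => simp only [pvLoopA, pvGenLoop, ih]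

theorem pvGen_snd (pS pE : List String → Bool) (l : List (List String)) (i si : Int) :
    (pvGenLoop pS pE l i si).2 =
      match l.findIdx? pE with
      | none => -1
      | some e => i + e := by
  induction l generalizing i si with
  | nil => simp [pvGenLoop]
  | cons h t ih =>
    simp only [pvGenLoop, List.findIdx?_cons]
    by_cases hE : pE h = true
    · simp [hE]
    · simp only [hE, if_false, Bool.false_eq_true]
      rw [ih]
      cases hf : t.findIdx? pE <;> simp only [Option.map_none, Option.map_some]
      push_cast; ring

theorem pvGen_fst_nonneg (pS pE : List String → Bool) (l : List (List String)) (i si : Int)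
    (h : ¬ si < 0) : (pvGenLoop pS pE l i si).1 = si := by
  induction l generalizing i with
  | nil => simp [pvGenLoop]
  | cons hd t ih =>
    simp only [pvGenLoop, h, false_and, if_false]
    split
    · rfl
    · exact ih (i + 1)

theorem pvGen_fst (pS pE : List String → Bool) (l : List (List String)) (i : Int) (e : Nat)
    (hi : 0 ≤ i) (he : l.findIdx? pE = some e) :
    (pvGenLoop pS pE l i (-1)).1 =
      match (l.take (e + 1)).findIdx? pS with
      | none => -1
      | some s => i + s := by
  induction l generalizing i e with
  | nil => simp at he
  | cons h t ih =>
    rw [List.findIdx?_cons] at he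
    by_cases hE : pE h = true
    · rw [if_pos hE] at he
      obtain rfl := Option.some.inj he
      have ht : List.take (0 + 1) (h :: t) = [h] := rfl
      rw [ht, List.findIdx?_cons, List.findIdx?_nil]
      by_cases hS : pS h = true <;> simp [pvGenLoop, hE, hS]
    · simp only [hE, if_false, Bool.false_eq_true] at he
      obtain ⟨e', hf, rfl⟩ : ∃ e', t.findIdx? pE = some e' ∧ e = e' + 1 := by
        cases hf : t.findIdx? pE <;> simp [hf] at he ⊢
        omega
      by_cases hS : pS h = true
      · simp only [pvGenLoop, hE, hS, and_true, if_false, Bool.false_eq_true]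
        have hlt : ((-1 : Int) < 0) := by norm_num
        simp only [hlt, if_true]
        rw [pvGen_fst_nonneg pS pE t (i+1) i (by omega)]
        simp [List.take_succ_cons, List.findIdx?_cons, hS]
      · simp only [pvGenLoop, hE, hS, and_false, if_false, Bool.false_eq_true]
        rw [ih (i + 1) e' (by omega) hf]
        rw [List.take_succ_cons, List.findIdx?_cons]
        simp only [hS, if_false, Bool.false_eq_true]
        cases hg : (t.take (e' + 1)).findIdx? pS <;>
          simp only [Option.map_none, Option.map_some]
        push_cast; ring

theorem take_map_eq_range {α β : Type} (f : α → β) (xs : List α) (d : α) (n : Nat)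
    (h : n ≤ xs.length) :
    (List.range n).map (fun k => f (xs.getD k d)) = (xs.take n).map f := by
  apply List.ext_getElem
  · simp [h]
  · intro i h1 h2
    simp only [List.length_map, List.length_range] at h1
    simp only [List.getElem_map, List.getElem_range, List.getElem_take]
    rw [List.getD_eq_getElem _ _ (by omega)]

theorem findIdx?_lt_length {α : Type} (p : α → Bool) (l : List α) (e : Nat)
    (h : l.findIdx? p = some e) : e < l.length := by
  induction l generalizing e with
  | nil => simp at h
  | cons a t ih =>
    rw [List.findIdx?_cons] at h
    by_cases hp : p a = true
    · rw [if_pos hp] at h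
      obtain rfl := Option.some.inj h
      simp
    · rw [if_neg hp] at h
      cases hf : t.findIdx? p with
      | none => rw [hf] at h; simp at h
      | some e' =>
        rw [hf] at h
        simp only [Option.map_some, Option.some.injEq] at h
        have := ih e' hf
        simp only [List.length_cons]
        omega

-- ===== VERDICT (by name: the statement is the Claim_ definition above) =====
theorem mapDiffContext_spec : Claim_equal_mapDiffContext := by
  intro sents start_sent end_sent _
  unfold Spec_mapDiffContext mapDiffContext mapDiffContext_alt
  dsimp only
  set ss := PySem.Str.join " " start_sent with hss
  set es := PySem.Str.join " " end_sent with hes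
  set pS : List String → Bool := fun t => PySem.Str.isIn ss (PySem.Str.join " " t) with hpS
  set pE : List String → Bool := fun t => PySem.Str.isIn es (PySem.Str.join " " t) with hpE
  rw [pvLoopA_eq_gen, ← hpS, ← hpE]
  have hcompE : ((fun t => PySem.Str.isIn es t) ∘ PySem.Str.join " ") = pE := rfl
  have hcompS : ((fun t => PySem.Str.isIn ss t) ∘ PySem.Str.join " ") = pS := rfl
  rw [List.findIdx?_map, hcompE]
  have hsnd := pvGen_snd pS pE sents 0 (-1)
  cases hE : sents.findIdx? pE with
  | none =>
    rw [hE] at hsnd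
    simp [hsnd]
  | some e =>
    rw [hE] at hsnd
    simp only [zero_add] at hsnd
    dsimp only
    rw [← List.map_take, List.findIdx?_map, hcompS]
    have hfst := pvGen_fst pS pE sents 0 e le_rfl hE
    have heL : e < sents.length := findIdx?_lt_length _ _ _ hE
    cases hS : (sents.take (e + 1)).findIdx? pS with
    | none =>
      rw [hS] at hfst
      simp [hfst, hsnd]
    | some s =>
      rw [hS] at hfst
      simp only [zero_add] at hfst
      have hsL : s < (sents.take (e+1)).length := findIdx?_lt_length _ _ _ hS
      simp only [List.length_take] at hsL
      have hse : s ≤ e := Nat.lt_succ_iff.mp (lt_of_lt_of_le hsL (min_le_left _ _))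
      clear hsL
      have h1 : ¬ ((s : Int) = -1 ∨ (e : Int) = -1) := by
        have hs0 : (0:Int) ≤ (s:Int) := Int.natCast_nonneg s
        have he0 : (0:Int) ≤ (e:Int) := Int.natCast_nonneg e
        rintro (h | h) <;> omega
      simp only [hfst, hsnd, h1, if_false]
      refine Prod.ext ?_ ?_
      · -- the slice equals the drop/take of B
        simp only
        have hcast : ((e : Int) + 1) = (((e + 1 : Nat) : Int)) := by push_cast; ring
        rw [hcast, PySem.List.slice_natCast, List.drop_take]
      · -- the range-indexed sum equals B's prefix sum
        simp only
        congr 1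
        have h0 : (((s : Int) - 0)).toNat = s := by rw [sub_zero]; exact Int.toNat_natCast s
        rw [PySem.List.pyRange_one, h0, List.map_map]
        have hmc : ((fun i => ((PySem.List.pyGetD sents i []).length : Int)) ∘ (fun k : Nat => (0:Int) + ↑k)) =
            (fun k : Nat => (((sents.getD k []).length : Int))) := by
          funext k
          simp [Function.comp, PySem.List.pyGetD_natCast]
        rw [hmc]
        exact congrArg List.sum (take_map_eq_range (fun x => ((x.length : Int))) sents [] s
          (Nat.le_of_lt (Nat.lt_of_le_of_lt hse heL)))
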